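-- pv_equiv track=rewrite | github.com/NURJAKS/lms-platform-deployed | backend/app/api/routes/ai_challenge.py | _calc_bonus_points
-- ===== SOURCE A (Python) =====
-- def _calc_bonus_points(correct_sequence: list[bool]) -> int:
--     """Бонусы: 2 подряд +1, 3 подряд +2, 4 подряд +3, 5 подряд +4."""
--     total = 0
--     streak = 0
--     for c in correct_sequence:
--         if c:
--             streak += 1
--             if streak >= 2:
--                 total += streak - 1
--         else:
--             streak = 0
--     return total
-- ===== SOURCE B (Python) =====
-- from itertools import groupby
--
--
-- def _calc_bonus_points(correct_sequence: list[bool]) -> int: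
--     """Бонусы: 2 подряд +1, 3 подряд +2, 4 подряд +3, 5 подряд +4."""
--     total = 0
--     for key, grp in groupby(correct_sequence):
--         if key:
--             run_len = sum(1 for _ in grp)
--             total += run_len * (run_len - 1) // 2
--     return total
-- ===== Notes on version B (the rewrite author's own statement) =====
-- stated objective: simpler
-- what changed: Replaces the incremental streak counter with itertools.groupby over maximal runs, adding the closed form L*(L-1)//2 per run of True.
import Mathlib
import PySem

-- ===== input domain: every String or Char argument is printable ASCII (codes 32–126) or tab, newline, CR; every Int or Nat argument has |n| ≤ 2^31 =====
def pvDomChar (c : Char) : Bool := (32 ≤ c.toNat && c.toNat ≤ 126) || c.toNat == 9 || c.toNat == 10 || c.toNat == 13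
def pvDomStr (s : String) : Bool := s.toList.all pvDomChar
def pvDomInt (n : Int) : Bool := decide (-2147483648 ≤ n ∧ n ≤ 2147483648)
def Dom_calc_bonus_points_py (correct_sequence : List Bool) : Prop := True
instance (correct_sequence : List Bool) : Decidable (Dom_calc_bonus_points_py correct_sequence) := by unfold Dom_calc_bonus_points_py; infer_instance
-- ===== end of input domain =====

-- B replaces the incremental streak counter with grouping into maximal runs and the
-- closed form L*(L-1)//2 per run of True (objective: simpler).

-- ===== PORT A =====
-- literal port of A's loop: state (total, streak)
def pvStepA (st : Int × Int) (c : Bool) : Int × Int :=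
  if c then
    let streak := st.2 + 1
    (if streak ≥ 2 then st.1 + (streak - 1) else st.1, streak)
  else
    (st.1, 0)

def calc_bonus_points_py (correct_sequence : List Bool) : Int :=
  (correct_sequence.foldl pvStepA (0, 0)).1

-- ===== PORT B =====
-- port of Source B's groupby loop: recurse over the maximal runs of equal values;
-- a True-run of length L contributes L*(L-1)//2 (PySem.Int.floordiv = Python //).
def pvRunsB : List Bool → Int
  | [] => 0
  | c :: rest =>
    let runLen : Int := 1 + ((rest.takeWhile (· == c)).length : Int)
    (if c then PySem.Int.floordiv (runLen * (runLen - 1)) 2 else 0)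
      + pvRunsB (rest.dropWhile (· == c))
termination_by xs => xs.length
decreasing_by
  exact Nat.lt_succ_of_le (List.length_dropWhile_le _ _)

def calc_bonus_points_py_alt (correct_sequence : List Bool) : Int :=
  pvRunsB correct_sequence

-- ===== PRECONDITION & SPEC =====
def Spec_calc_bonus_points_py (correct_sequence : List Bool) (out : Int) : Prop := out = calc_bonus_points_py_alt correct_sequence
instance (correct_sequence : List Bool) (out : Int) : Decidable (Spec_calc_bonus_points_py correct_sequence out) := by unfold Spec_calc_bonus_points_py; infer_instance

-- ===== CLAIM (what is proved, stated in full; the proofs are below) =====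
def Claim_equal_calc_bonus_points_py : Prop := ∀ (correct_sequence : List Bool), Dom_calc_bonus_points_py correct_sequence → Spec_calc_bonus_points_py correct_sequence (calc_bonus_points_py correct_sequence)

-- ===== LEMMAS AND PROOFS =====

-- A's fold over a block of k Trues, entered with streak s ≥ 1
theorem pvFoldA_trues (k : Nat) : ∀ (rest : List Bool) (t s : Int), 1 ≤ s →
    List.foldl pvStepA (t, s) (List.replicate k true ++ rest)
      = List.foldl pvStepA (t + (k : Int) * s + (k : Int) * ((k : Int) - 1) / 2, s + (k : Int)) rest := by
  induction k with
  | zero => intro rest t s _; simp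
  | succ k ih =>
    intro rest t s hs
    rw [List.replicate_succ, List.cons_append, List.foldl_cons]
    have hstep : pvStepA (t, s) true = (t + s, s + 1) := by
      simp only [pvStepA, if_pos]
      have h2 : s + 1 ≥ 2 := by omega
      simp [h2]
    rw [hstep, ih rest (t + s) (s + 1) (by omega)]
    apply congrArg (fun st => List.foldl pvStepA st rest)
    rw [Prod.mk.injEq]
    push_cast
    have e1 : ((k:Int)+1)*s = (k:Int)*s + s := by ring
    have e2 : (k:Int)*(s+1) = (k:Int)*s + (k:Int) := by ring
    have e3 : ((k:Int)+1)*(((k:Int)+1)-1) = (k:Int)*((k:Int)-1) + 2*(k:Int) := by ring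
    have hd : (2:Int) ∣ (k:Int)*((k:Int)-1) := by
      rcases Int.even_or_odd (k:Int) with h | h
      · exact Dvd.dvd.mul_right h.two_dvd _
      · exact Dvd.dvd.mul_left (by obtain ⟨m, hm⟩ := h; exact ⟨m, by omega⟩) _
    rw [e1, e2, e3]
    generalize (k:Int)*s = p at *
    generalize (k:Int)*((k:Int)-1) = d at *
    constructor <;> omega

-- A's fold ignores a leading block of Falses when the streak is already 0
theorem pvFoldA_falses0 (k : Nat) : ∀ (rest : List Bool) (t : Int),
    List.foldl pvStepA (t, 0) (List.replicate k false ++ rest)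
      = List.foldl pvStepA (t, 0) rest := by
  induction k with
  | zero => intro rest t; simp
  | succ k ih =>
    intro rest t
    rw [List.replicate_succ, List.cons_append, List.foldl_cons]
    have : pvStepA (t, 0) false = (t, 0) := by simp [pvStepA]
    rw [this, ih]

-- the totals agree regardless of the incoming streak, when the list is empty or starts False
theorem pvFoldA_reset (l : List Bool) (t s : Int)
    (h : l = [] ∨ ∃ l', l = false :: l') :
    (List.foldl pvStepA (t, s) l).1 = (List.foldl pvStepA (t, 0) l).1 := by
  rcases h with h | ⟨l', h⟩ <;> subst h
  · rfl
  · simp [pvStepA]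

-- a takeWhile (· == c) block is a replicate of c
theorem pvTakeWhile_rep (c : Bool) (l : List Bool) :
    l.takeWhile (· == c) = List.replicate (l.takeWhile (· == c)).length c := by
  induction l with
  | nil => rfl
  | cons a l ih =>
    by_cases h : a = c
    · subst h; simp [List.replicate_succ, ← ih]
    · have : (a == c) = false := by simp [h]
      simp [this]

-- the element after the dropWhile block fails the predicate
theorem pvDropWhile_shape (c : Bool) (l : List Bool) :
    l.dropWhile (· == c) = [] ∨
      ∃ l', l.dropWhile (· == c) = (!c) :: l' := by
  induction l with
  | nil => exact Or.inl rfl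
  | cons a l ih =>
    by_cases h : a = c
    · subst h; simpa [List.dropWhile_cons] using ih
    · right
      have hne : (a == c) = false := by simp [h]
      refine ⟨l, ?_⟩
      rw [List.dropWhile_cons, hne]
      simp only [Bool.false_eq_true, if_false]
      congr 1
      cases a <;> cases c <;> simp_all

-- unfolding lemma for B's run recursion on a cons cell
theorem pvRunsB_cons (c : Bool) (rest : List Bool) :
    pvRunsB (c :: rest)
      = (if c then PySem.Int.floordiv
            ((1 + ((rest.takeWhile (· == c)).length : Int))
              * ((1 + ((rest.takeWhile (· == c)).length : Int)) - 1)) 2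
          else 0)
        + pvRunsB (rest.dropWhile (· == c)) := by
  rw [pvRunsB]

-- main invariant: A's total starting from streak 0 equals t plus B's run sum
theorem pvMain (n : Nat) : ∀ (xs : List Bool), xs.length ≤ n → ∀ (t : Int),
    (List.foldl pvStepA (t, 0) xs).1 = t + pvRunsB xs := by
  induction n with
  | zero =>
    intro xs hlen t
    have : xs = [] := List.eq_nil_of_length_eq_zero (Nat.le_zero.mp hlen)
    subst this; simp [pvRunsB]
  | succ n ih =>
    intro xs hlen t
    match xs with
    | [] => simp [pvRunsB]
    | c :: rest =>
      set L : Nat := (rest.takeWhile (· == c)).length with hL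
      have hsplit : c :: rest = List.replicate (L + 1) c ++ rest.dropWhile (· == c) := by
        rw [List.replicate_succ, List.cons_append, ← pvTakeWhile_rep c rest,
          List.takeWhile_append_dropWhile]
      have hdroplen : (rest.dropWhile (· == c)).length ≤ n := by
        have := List.length_dropWhile_le (· == c) rest
        simp at hlen; omega
      have hdropB := ih (rest.dropWhile (· == c)) hdroplen
      have hshape := pvDropWhile_shape c rest
      rw [pvRunsB_cons]
      cases c with
      | false =>
        rw [hsplit, pvFoldA_falses0, hdropB]
        simp
      | true =>
        rw [hsplit]
        rw [List.replicate_succ, List.cons_append, List.foldl_cons]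
        have hstep : pvStepA (t, 0) true = (t, 1) := by simp [pvStepA]
        rw [hstep, pvFoldA_trues L _ t 1 le_rfl]
        rw [pvFoldA_reset _ _ _ (by simpa using hshape), hdropB]
        simp only [if_pos]
        rw [PySem.Int.floordiv_eq_ediv_of_pos (by norm_num)]
        have hd : (2:Int) ∣ (L:Int)*((L:Int)-1) := by
          rcases Int.even_or_odd (L:Int) with h | h
          · exact Dvd.dvd.mul_right h.two_dvd _
          · exact Dvd.dvd.mul_left (by obtain ⟨m, hm⟩ := h; exact ⟨m, by omega⟩) _
        have e3 : (1 + (L:Int)) * (1 + (L:Int) - 1) = (L:Int)*((L:Int)-1) + 2*(L:Int) := by ring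
        rw [← hL, e3]
        generalize (L:Int)*((L:Int)-1) = d at *
        omega

-- ===== VERDICT (by name: the statement is the Claim_ definition above) =====
theorem calc_bonus_points_py_spec : Claim_equal_calc_bonus_points_py := by
  intro xs _
  unfold Spec_calc_bonus_points_py calc_bonus_points_py calc_bonus_points_py_alt
  simpa using pvMain xs.length xs le_rfl 0
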